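-- pv_equiv track=rewrite | github.com/YounghwanShin/L2_ASR | preprocess_l2arctic.py | remove_repetitive_sil
-- ===== SOURCE A (Python) =====
-- def remove_repetitive_sil(phone_list):
--     """Remove consecutive silence tokens."""
--     if not phone_list:
--         return phone_list
--
--     remove_sil_mask = [phone == "sil" for phone in phone_list]
--
--     for i, is_sil in enumerate(remove_sil_mask):
--         if is_sil:
--             if i == len(remove_sil_mask) - 1:
--                 remove_sil_mask[i] = False
--             elif not remove_sil_mask[i + 1]:
--                 remove_sil_mask[i] = False
--
--     return [phone for i, phone in enumerate(phone_list) if not remove_sil_mask[i]]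
-- ===== SOURCE B (Python) =====
-- def remove_repetitive_sil(phone_list):
--     """Remove consecutive silence tokens (single pass, lookbehind on the output)."""
--     if not phone_list:
--         return phone_list
--     result = []
--     for phone in phone_list:
--         if phone == "sil" and result and result[-1] == "sil":
--             continue
--         result.append(phone)
--     return result
-- ===== Notes on version B (the rewrite author's own statement) =====
-- stated objective: simpler
-- what changed: Replaced A's mutable lookahead mask (built in one pass, patched in a second index loop, then used by a filtering comprehension) with a single streaming pass that looks behind at the last element already emitted; no mask and no index arithmetic.
import Mathlib
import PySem

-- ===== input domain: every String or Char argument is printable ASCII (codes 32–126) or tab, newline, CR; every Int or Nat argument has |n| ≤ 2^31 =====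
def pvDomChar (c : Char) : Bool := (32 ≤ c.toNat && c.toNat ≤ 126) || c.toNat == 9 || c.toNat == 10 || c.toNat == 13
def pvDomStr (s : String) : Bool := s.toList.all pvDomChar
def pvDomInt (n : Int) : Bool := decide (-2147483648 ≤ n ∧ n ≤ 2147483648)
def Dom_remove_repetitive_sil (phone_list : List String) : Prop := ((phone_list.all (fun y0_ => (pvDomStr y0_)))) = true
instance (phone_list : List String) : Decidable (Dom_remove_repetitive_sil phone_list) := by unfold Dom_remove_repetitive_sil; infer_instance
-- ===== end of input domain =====

-- B replaces A's two-pass lookahead mask with one streaming pass using lookbehind on the output (objective: simpler).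

-- ===== PORT A =====
-- the 'for i, is_sil in enumerate(remove_sil_mask)' loop, mutating the mask in place;
-- reading the (possibly already mutated) current mask at i matches Python's live iteration.
def pvLoopA (mask : List Bool) (i : Nat) : List Bool :=
  if h : i < mask.length then
    pvLoopA
      (if mask[i] then
        (if i == mask.length - 1 then mask.set i false
         else if !(mask.getD (i + 1) false) then mask.set i false
         else mask)
       else mask)
      (i + 1)
  else mask
termination_by mask.length - i
decreasing_by split_ifs <;> (try simp only [List.length_set]) <;> omega

def remove_repetitive_sil (phone_list : List String) : List String :=
  if phone_list.isEmpty then phone_list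
  else
    let mask := phone_list.map (fun phone => phone == "sil")
    let final := pvLoopA mask 0
    ((PySem.List.enumerate phone_list).filter
        (fun ip => ! PySem.List.pyGetD final ip.1 false)).map (·.2)

-- ===== PORT B =====
def remove_repetitive_sil_alt (phone_list : List String) : List String :=
  if phone_list.isEmpty then phone_list
  else
    phone_list.foldl
      (fun result phone =>
        -- result[-1] of a nonempty list = its last element (PySem.List.pyGet? result (-1))
        if phone == "sil" && !result.isEmpty && (PySem.List.pyGet? result (-1) == some "sil")
        then result
        else result ++ [phone])
      []

-- ===== PRECONDITION & SPEC =====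
def Spec_remove_repetitive_sil (phone_list : List String) (out : List String) : Prop := out = remove_repetitive_sil_alt phone_list
instance (phone_list : List String) (out : List String) : Decidable (Spec_remove_repetitive_sil phone_list out) := by unfold Spec_remove_repetitive_sil; infer_instance

-- ===== CLAIM (what is proved, stated in full; the proofs are below) =====
def Claim_equal_remove_repetitive_sil : Prop := ∀ (phone_list : List String), Dom_remove_repetitive_sil phone_list → Spec_remove_repetitive_sil phone_list (remove_repetitive_sil phone_list)

-- ===== LEMMAS AND PROOFS =====

-- final value of A's mask: mask[j] && mask[j+1] (false past the end)
def pvG : List Bool → List Bool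
  | [] => []
  | a :: t => (a && t.headD false) :: pvG t

-- structural form of A's filtering comprehension: keep phone unless it is 'sil' followed by 'sil'
def pvKeepA : List String → List String
  | [] => []
  | a :: t => if a == "sil" && ((t.headD "") == "sil") && !t.isEmpty then pvKeepA t else a :: pvKeepA t

-- filter a list by a boolean mask of the same length
def pvFz : List String → List Bool → List String
  | [], _ => []
  | _ :: _, [] => []
  | a :: t, b :: mt => if !b then a :: pvFz t mt else pvFz t mt

-- B's tail behaviour: b = "last emitted phone is 'sil'"
def pvGB : Bool → List String → List String
  | _, [] => []
  | b, x :: t => if (x == "sil") && b then pvGB true t else x :: pvGB (x == "sil") t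

theorem pvG_length (m : List Bool) : (pvG m).length = m.length := by
  induction m with
  | nil => rfl
  | cons a t ih => simp [pvG, ih]

theorem pvTakeSet {mask : List Bool} {i : Nat} (hi : i < mask.length) (v : Bool) :
    (mask.set i v).take (i + 1) = mask.take i ++ [v] := by
  rw [List.set_eq_take_append_cons_drop, if_pos hi, List.take_append]
  have h1 : (mask.take i).length = i := by simp [Nat.le_of_lt hi]
  rw [List.take_of_length_le (by omega), h1]
  simp

theorem pvDropSet {mask : List Bool} (i : Nat) (v : Bool) :
    (mask.set i v).drop (i + 1) = mask.drop (i + 1) := by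
  rw [List.drop_set]
  simp

theorem pvLoopA_spec (k : Nat) : ∀ (mask : List Bool) (i : Nat), mask.length - i = k →
    pvLoopA mask i = mask.take i ++ pvG (mask.drop i) := by
  induction k with
  | zero =>
    intro mask i h
    have hle : mask.length ≤ i := by omega
    rw [pvLoopA]
    simp [Nat.not_lt.mpr hle, List.take_of_length_le hle, List.drop_of_length_le hle, pvG]
  | succ k ih =>
    intro mask i h
    have hi : i < mask.length := by omega
    rw [pvLoopA]
    simp only [hi, dif_pos]
    have hdrop : mask.drop i = mask[i] :: mask.drop (i + 1) := List.drop_eq_getElem_cons hi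
    have hG : pvG (mask[i] :: mask.drop (i + 1)) =
        (mask[i] && (mask.drop (i + 1)).headD false) :: pvG (mask.drop (i + 1)) := rfl
    have hhead : (mask.drop (i + 1)).headD false = mask[i + 1]?.getD false := by
      rw [List.headD_eq_head?_getD, List.head?_drop]
    by_cases hs : mask[i] = true
    · by_cases hlast : i = mask.length - 1
      · have htail : mask.drop (i + 1) = [] := List.drop_of_length_le (by omega)
        rw [if_pos hs, if_pos (by simp [hlast]),
          ih _ _ (by simp; omega), pvDropSet, pvTakeSet hi, hdrop, hG, htail]
        simp
      · have hi1 : i + 1 < mask.length := by omega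
        by_cases hnext : mask[i + 1]?.getD false = true
        · rw [if_pos hs, if_neg (by simp [hlast]),
            if_neg (by simp [List.getD_eq_getElem?_getD, hnext]),
            ih _ _ (by omega), List.take_add_one, List.getElem?_eq_getElem hi, hdrop, hG]
          simp [hnext, hs]
        · rw [if_pos hs, if_neg (by simp [hlast]),
            if_pos (by simp [List.getD_eq_getElem?_getD]; simpa using hnext),
            ih _ _ (by simp; omega), pvDropSet, pvTakeSet hi, hdrop, hG]
          simp at hnext
          simp [hnext]
    · rw [if_neg hs, ih _ _ (by omega), List.take_add_one, List.getElem?_eq_getElem hi, hdrop, hG]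
      simp at hs
      simp [hs]

theorem pvFilt (l : List String) : ∀ (pre m : List Bool), m.length = l.length →
    ((PySem.List.enumerate l (pre.length : Int)).filter
        (fun ip => ! PySem.List.pyGetD (pre ++ m) ip.1 false)).map (·.2) = pvFz l m := by
  induction l with
  | nil => intro pre m h; simp [PySem.List.enumerate_nil, pvFz]
  | cons a t ih =>
    intro pre m h
    match m with
    | b :: mt =>
      have hmt : mt.length = t.length := by simpa using h
      rw [PySem.List.enumerate_cons, List.filter_cons]
      cases b with
      | true =>
        have hget : PySem.List.pyGetD (pre ++ true :: mt) (pre.length : Int) false = true := by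
          simp [PySem.List.pyGetD]
        rw [hget, if_neg (by simp),
          show ((pre.length : Int) + 1) = (((pre ++ [true]).length : Int)) from by push_cast; simp,
          show pre ++ true :: mt = (pre ++ [true]) ++ mt from by simp,
          ih (pre ++ [true]) mt hmt]
        simp [pvFz]
      | false =>
        have hget : PySem.List.pyGetD (pre ++ false :: mt) (pre.length : Int) false = false := by
          simp [PySem.List.pyGetD]
        rw [hget, if_pos (by simp), List.map_cons,
          show ((pre.length : Int) + 1) = (((pre ++ [false]).length : Int)) from by push_cast; simp,
          show pre ++ false :: mt = (pre ++ [false]) ++ mt from by simp,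
          ih (pre ++ [false]) mt hmt]
        simp [pvFz]

theorem pvFz_pvG_map (l : List String) : pvFz l (pvG (l.map (fun p => p == "sil"))) = pvKeepA l := by
  induction l with
  | nil => rfl
  | cons a t ih =>
    have hhead : ((t.map (fun p => p == "sil")).headD false) = ((t.headD "" == "sil") && !t.isEmpty) := by
      cases t <;> simp
    simp only [List.map_cons, pvG, pvFz, pvKeepA, hhead, ih]
    cases ha : (a == "sil") <;> cases hh : ((t.headD "" : String) == "sil") <;> cases he : t.isEmpty <;>
      simp [ha, hh, he]

theorem remove_repetitive_sil_eq_keepA (l : List String) (hne : l ≠ []) :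
    remove_repetitive_sil l = pvKeepA l := by
  have hise : l.isEmpty = false := by simpa using hne
  have hloop := pvLoopA_spec (l.map (fun p => p == "sil")).length (l.map (fun p => p == "sil")) 0 rfl
  simp only [List.take_zero, List.drop_zero, List.nil_append] at hloop
  have hfilt := pvFilt l ([] : List Bool) (pvG (l.map (fun p => p == "sil"))) (by simp [pvG_length])
  simp only [List.length_nil, Int.natCast_zero, List.nil_append] at hfilt
  rw [remove_repetitive_sil, hise]
  simp only [Bool.false_eq_true, if_false, hloop]
  rw [hfilt, pvFz_pvG_map]

-- B's foldl invariant: b = "last emitted phone is 'sil'"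
theorem pvB_foldl (l : List String) : ∀ (acc : List String), acc ≠ [] →
    l.foldl
      (fun result phone =>
        if phone == "sil" && !result.isEmpty && (PySem.List.pyGet? result (-1) == some "sil")
        then result else result ++ [phone]) acc
    = acc ++ pvGB (acc.getLast? == some "sil") l := by
  induction l with
  | nil => intro acc _; simp [pvGB]
  | cons x t ih =>
    intro acc hacc
    have hemp : (!acc.isEmpty) = true := by simp [hacc]
    simp only [List.foldl_cons]
    cases hx : (x == "sil") with
    | false =>
      rw [if_neg (by simp [hx]), ih (acc ++ [x]) (by simp), List.getLast?_concat]
      have hxs : x ≠ "sil" := by simpa using hx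
      rw [show ((some x == some "sil") = false) from by simp [hxs], pvGB]
      simp [hx]
    | true =>
      cases hl : (acc.getLast? == some "sil") with
      | true =>
        rw [if_pos (by simp [hacc, PySem.List.pyGet?_neg_one, hl]), ih acc hacc, hl, pvGB]
        simp [hx]
      | false =>
        rw [if_neg (by simp [PySem.List.pyGet?_neg_one, hl]), ih (acc ++ [x]) (by simp), List.getLast?_concat]
        have hxs : x = "sil" := by simpa using hx
        subst hxs
        rw [show ((some "sil" == some "sil") = true) from by simp, pvGB]
        simp

-- joint induction: A's lookahead filter matches B's lookbehind, with b tracking a preceding 'sil'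
theorem pvKeepA_gB (t : List String) :
    pvKeepA ("sil" :: t) = "sil" :: pvGB true t ∧ pvKeepA t = pvGB false t := by
  induction t with
  | nil => constructor <;> rfl
  | cons y r ih =>
    obtain ⟨ih1, ih2⟩ := ih
    by_cases hy : y = "sil"
    · subst hy
      have h2 : pvKeepA ("sil" :: r) = pvGB false ("sil" :: r) := by
        rw [ih1, pvGB]; simp
      refine ⟨?_, h2⟩
      show pvKeepA ("sil" :: "sil" :: r) = _
      rw [show pvKeepA ("sil" :: "sil" :: r) = pvKeepA ("sil" :: r) from by
          cases r <;> simp [pvKeepA], ih1, pvGB]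
      simp
    · have h2 : pvKeepA (y :: r) = pvGB false (y :: r) := by
        rw [show pvKeepA (y :: r) = y :: pvKeepA r from by simp [pvKeepA, hy], ih2, pvGB]
        simp [show (y == "sil") = false from by simp [hy]]
      refine ⟨?_, h2⟩
      rw [show pvKeepA ("sil" :: y :: r) = "sil" :: pvKeepA (y :: r) from by simp [pvKeepA, hy],
        h2, pvGB]
      simp [hy, pvGB]

theorem pvAlt_eq (l : List String) : remove_repetitive_sil_alt l = pvKeepA l := by
  match l with
  | [] => rfl
  | x :: t =>
    rw [remove_repetitive_sil_alt, if_neg (by simp)]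
    simp only [List.foldl_cons]
    rw [show (if (x == "sil" && !(List.isEmpty ([] : List String)) &&
        (PySem.List.pyGet? ([] : List String) (-1) == some "sil")) = true
        then ([] : List String) else [] ++ [x]) = [x] from by simp]
    rw [pvB_foldl t [x] (by simp)]
    cases hx : (x == "sil") with
    | true =>
      have hxs : x = "sil" := by simpa using hx
      subst hxs
      rw [show ((([ "sil" ] : List String).getLast? == some "sil") = true) from by simp]
      simpa using (pvKeepA_gB t).1.symm
    | false =>
      have hxs : x ≠ "sil" := by simpa using hx
      rw [show ((([x] : List String).getLast? == some "sil") = false) from by simp [hxs]]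
      simp [pvKeepA, hx, (pvKeepA_gB t).2]

-- ===== VERDICT (by name: the statement is the Claim_ definition above) =====
theorem remove_repetitive_sil_spec : Claim_equal_remove_repetitive_sil := by
  intro l _
  unfold Spec_remove_repetitive_sil
  by_cases h : l = []
  · subst h; rfl
  · rw [remove_repetitive_sil_eq_keepA l h, pvAlt_eq]
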